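-- pv_equiv track=rewrite | github.com/vyraun/ae-wavenet | util.py | greatest_lower_bound
-- ===== SOURCE A (Python) =====
-- def greatest_lower_bound(a, q):
--     '''return largest i such that a[i] <= q.  assume a is sorted.
--     if q < a[0], return -1'''
--     l, u = 0, len(a) - 1
--     while (l < u):
--         m = u - (u - l) // 2
--         if a[m] <= q:
--             l = m
--         else:
--             u = m - 1
--     return l or -1 + (a[l] <= q)
-- ===== SOURCE B (Python) =====
-- def greatest_lower_bound(a, q):
--     '''return largest i such that a[i] <= q.  assume a is sorted.
--     if q < a[0], return -1'''
--     def go(lo, hi):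
--         # half-open search interval [lo, hi); answer index is lo when it shrinks to one cell
--         if hi - lo <= 1:
--             return lo
--         m = (lo + hi) // 2
--         return go(m, hi) if a[m] <= q else go(lo, m)
--     lo = go(0, len(a))
--     if lo:
--         return lo
--     return 0 if a[0] <= q else -1
-- ===== Notes on version B (the rewrite author's own statement) =====
-- stated objective: simpler
-- what changed: Recast A's iterative closed-interval [l,u] search with upper midpoint u-(u-l)//2 as a recursive half-open [lo,hi) search with the standard floor midpoint (lo+hi)//2 and width test hi-lo<=1 (it probes the same indices on every list), and replaced the opaque 'l or -1 + (a[l] <= q)' return with explicit 0/-1 cases.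
import Mathlib
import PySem

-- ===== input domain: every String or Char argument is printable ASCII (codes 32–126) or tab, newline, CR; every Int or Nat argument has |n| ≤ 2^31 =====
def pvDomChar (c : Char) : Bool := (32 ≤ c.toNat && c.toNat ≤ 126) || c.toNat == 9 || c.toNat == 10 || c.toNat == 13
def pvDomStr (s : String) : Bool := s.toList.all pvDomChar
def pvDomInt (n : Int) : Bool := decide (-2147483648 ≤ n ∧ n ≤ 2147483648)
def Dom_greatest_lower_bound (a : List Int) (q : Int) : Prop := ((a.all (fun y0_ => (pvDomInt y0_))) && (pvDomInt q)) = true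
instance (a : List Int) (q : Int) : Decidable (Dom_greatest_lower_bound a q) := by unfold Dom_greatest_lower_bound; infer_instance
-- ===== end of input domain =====

-- B recasts A's iterative closed-interval [l,u] search (upper midpoint u-(u-l)//2) as a
-- recursive half-open [lo,hi) search with floor midpoint (lo+hi)//2, and replaces the
-- opaque 'l or -1 + (a[l] <= q)' return with explicit 0/-1 cases (simpler; not faster).

-- ===== PORT A =====
-- while (l < u): m = u - (u - l) // 2; if a[m] <= q: l = m else: u = m - 1
def glbLoop (a : List Int) (q : Int) (l u : Int) : Int :=
  if _h : l < u then
    let m := u - PySem.Int.floordiv (u - l) 2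
    match PySem.List.pyGet? a m with
    | some am => if am ≤ q then glbLoop a q m u else glbLoop a q l (m - 1)
    | none => 0   -- IndexError (never reached from greatest_lower_bound's initial l, u)
  else l
termination_by (u - l).toNat
decreasing_by
  all_goals
    have hd := PySem.Int.floordiv_eq_ediv_of_pos (a := u - l) (b := 2) (by omega)
    simp only [hd] at *
    omega

def greatest_lower_bound (a : List Int) (q : Int) : Int :=
  let l := glbLoop a q 0 (PySem.List.len a - 1)
  -- return l or -1 + (a[l] <= q)
  if l = 0 then
    match PySem.List.pyGet? a l with
    | some al => -1 + (if al ≤ q then 1 else 0)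
    | none => 0   -- IndexError (empty list); excluded by Pre_
  else l

-- ===== PORT B =====
-- def go(lo, hi): if hi - lo <= 1: return lo; m = (lo + hi) // 2; ...
-- lo and hi start at 0 and len(a) and stay nonnegative, so they live in Nat;
-- (lo + hi) // 2 on these nonnegative values is exactly Nat division.
def glbGo (a : List Int) (q : Int) (lo hi : Nat) : Nat :=
  if hi - lo ≤ 1 then lo
  else
    let m := (lo + hi) / 2
    match a[m]? with
    | some am => if am ≤ q then glbGo a q m hi else glbGo a q lo m
    | none => 0   -- IndexError (never reached from greatest_lower_bound_alt's initial lo, hi)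
termination_by hi - lo
decreasing_by
  all_goals
    have := Nat.div_add_mod (lo + hi) 2
    have := Nat.mod_lt (lo + hi) (y := 2) (by omega)
    omega

def greatest_lower_bound_alt (a : List Int) (q : Int) : Int :=
  let lo := glbGo a q 0 a.length
  if lo ≠ 0 then (lo : Int)
  else
    match a[0]? with
    | some a0 => if a0 ≤ q then 0 else -1
    | none => 0   -- IndexError (empty list); excluded by Pre_

-- ===== PRECONDITION & SPEC =====
-- Pre_ excludes only the empty list, on which A raises IndexError at a[l] (B likewise at a[0]).
def Pre_greatest_lower_bound (a : List Int) (q : Int) : Prop := a ≠ []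
instance (a : List Int) (q : Int) : Decidable (Pre_greatest_lower_bound a q) := by
  unfold Pre_greatest_lower_bound; infer_instance

def pvWitness_greatest_lower_bound : List Int × Int := ([1, 2, 2, 5], 2)

def Spec_greatest_lower_bound (a : List Int) (q : Int) (out : Int) : Prop := out = greatest_lower_bound_alt a q
instance (a : List Int) (q : Int) (out : Int) : Decidable (Spec_greatest_lower_bound a q out) := by unfold Spec_greatest_lower_bound; infer_instance

-- ===== CLAIM =====
def Claim_equal_greatest_lower_bound : Prop := ∀ (a : List Int) (q : Int), Dom_greatest_lower_bound a q → Pre_greatest_lower_bound a q → Spec_greatest_lower_bound a q (greatest_lower_bound a q)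

-- ===== LEMMAS AND PROOFS =====

-- The two searches coincide step for step under u = hi - 1: the closed-interval upper
-- midpoint u - (u - l) // 2 equals the half-open floor midpoint (lo + hi) // 2.
lemma glbLoop_eq_glbGo (a : List Int) (q : Int) :
    ∀ (k lo hi : Nat), hi - lo ≤ k →
      glbLoop a q (lo : Int) ((hi : Int) - 1) = ((glbGo a q lo hi : Nat) : Int) := by
  intro k
  induction k with
  | zero =>
    intro lo hi hk
    rw [glbLoop, dif_neg (by omega), glbGo, if_pos (by omega)]
  | succ k ih =>
    intro lo hi hk
    by_cases hw : hi - lo ≤ 1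
    · rw [glbLoop, dif_neg (by omega), glbGo, if_pos hw]
    · -- hi - lo ≥ 2, so l = lo < u = hi - 1
      have hdm := Nat.div_add_mod (lo + hi) 2
      have hml := Nat.mod_lt (lo + hi) (y := 2) (by omega)
      set m := (lo + hi) / 2 with hm
      have hmb : lo < m ∧ m < hi := by omega
      have hd : PySem.Int.floordiv ((hi : Int) - 1 - lo) 2 = ((hi : Int) - 1 - lo) / 2 :=
        PySem.Int.floordiv_eq_ediv_of_pos (by omega)
      have hdiv : ((hi : Int) - 1 - lo) / 2 = (hi : Int) - 1 - m := by omega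
      have hmid : (hi : Int) - 1 - PySem.Int.floordiv ((hi : Int) - 1 - lo) 2 = (m : Nat) := by
        rw [hd, hdiv]; omega
      rw [glbLoop, dif_pos (by omega : (lo : Int) < (hi : Int) - 1), glbGo, if_neg hw]
      simp only [hmid, PySem.List.pyGet?_natCast]
      cases hg : a[m]? with
      | none => rfl
      | some am =>
        dsimp only
        by_cases hle : am ≤ q
        · rw [if_pos hle, if_pos hle]
          exact ih m hi (by omega)
        · rw [if_neg hle, if_neg hle]
          exact ih lo m (by omega)

-- ===== VERDICT =====
theorem greatest_lower_bound_spec : Claim_equal_greatest_lower_bound := by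
  intro a q _ hne
  unfold Spec_greatest_lower_bound greatest_lower_bound greatest_lower_bound_alt
  have heq : glbLoop a q 0 (PySem.List.len a - 1) = ((glbGo a q 0 a.length : Nat) : Int) := by
    have := glbLoop_eq_glbGo a q a.length 0 a.length (by omega)
    simpa [PySem.List.len_eq] using this
  rw [heq]
  set L := glbGo a q 0 a.length with hL
  by_cases hz : L = 0
  · rw [if_pos (by omega), if_neg (by simp [hz]), hz]
    simp only [PySem.List.pyGet?_natCast]
    cases hg : a[0]? with
    | none => rfl
    | some a0 =>
      dsimp only
      by_cases hle : a0 ≤ q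
      · rw [if_pos hle, if_pos hle]; omega
      · rw [if_neg hle, if_neg hle]; omega
  · rw [if_neg (by omega), if_pos (by simpa using hz)]
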